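-- pv_equiv track=rewrite | github.com/hakandundar34coding/system-monitoring-center | src/Common.py | get_new_deleted_updated_rows
-- ===== SOURCE A (Python) =====
-- def get_new_deleted_updated_rows(row_id_list, row_id_list_prev):
--     """
--     Get new/deleted/updated rows for updating treestore/treeview.
--     """
--
--     row_id_list_prev_set = set(row_id_list_prev)
--     row_id_list_set = set(row_id_list)
--     deleted_rows = sorted(list(row_id_list_prev_set - row_id_list_set))
--     new_rows = sorted(list(row_id_list_set - row_id_list_prev_set))
--     existing_rows = sorted(list(row_id_list_set.intersection(row_id_list_prev)))
--     # "c = set(a).intersection(b)" is about 19% faster than "c = set(a).intersection(set(b))"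
--     updated_existing_row_index = [[row_id_list.index(i), row_id_list_prev.index(i)] for i in existing_rows]
--
--     return deleted_rows, new_rows, updated_existing_row_index
-- ===== SOURCE B (Python) =====
-- def get_new_deleted_updated_rows(row_id_list, row_id_list_prev):
--     # Sort-then-merge: the distinct ids of each list are sorted once, and one
--     # two-pointer merge over the two strictly increasing sequences classifies
--     # every id as deleted / new / existing in already-sorted order, so no set
--     # algebra and no post-classification sorts are needed.
--     cur = sorted(set(row_id_list))
--     prev = sorted(set(row_id_list_prev))
--     first_cur = {}
--     for idx, rid in enumerate(row_id_list):
--         first_cur.setdefault(rid, idx)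
--     first_prev = {}
--     for idx, rid in enumerate(row_id_list_prev):
--         first_prev.setdefault(rid, idx)
--     deleted_rows, new_rows, updated = [], [], []
--     i = j = 0
--     while i < len(cur) and j < len(prev):
--         a, b = cur[i], prev[j]
--         if a == b:
--             updated.append([first_cur[a], first_prev[a]])
--             i += 1
--             j += 1
--         elif a < b:
--             new_rows.append(a)
--             i += 1
--         else:
--             deleted_rows.append(b)
--             j += 1
--     new_rows.extend(cur[i:])
--     deleted_rows.extend(prev[j:])
--     return deleted_rows, new_rows, updated
-- ===== Notes on version B (the rewrite author's own statement) =====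
-- stated objective: faster
-- what changed: Replaces set subtraction/intersection plus per-id list.index rescans by sorting the two distinct-id sequences once and classifying every id in a single two-pointer merge (deleted/new/existing emerge already sorted), with first-occurrence indices taken from setdefault tables built in one pass each.
import Mathlib
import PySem

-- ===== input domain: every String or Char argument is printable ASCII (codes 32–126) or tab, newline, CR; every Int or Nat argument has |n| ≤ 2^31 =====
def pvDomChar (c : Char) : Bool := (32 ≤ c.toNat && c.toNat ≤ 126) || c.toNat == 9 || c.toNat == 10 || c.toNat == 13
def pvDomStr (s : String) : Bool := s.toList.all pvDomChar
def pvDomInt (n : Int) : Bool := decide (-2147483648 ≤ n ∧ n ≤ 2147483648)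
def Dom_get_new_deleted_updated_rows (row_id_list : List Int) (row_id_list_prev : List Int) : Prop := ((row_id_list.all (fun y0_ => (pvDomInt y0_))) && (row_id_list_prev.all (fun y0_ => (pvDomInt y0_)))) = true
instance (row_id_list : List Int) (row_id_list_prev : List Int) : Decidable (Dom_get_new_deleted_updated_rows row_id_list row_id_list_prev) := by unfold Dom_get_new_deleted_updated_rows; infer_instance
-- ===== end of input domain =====

-- B replaces A's set algebra + per-id list.index scans by sorting the distinct ids once and
-- classifying them in a single two-pointer merge (objective: faster, asymptotic).


-- ===== PORT A =====
-- list.index(i) is taken only for i in the intersection of both lists, so it cannot raise;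
-- the .getD 0 default is unreachable there.
def get_new_deleted_updated_rows (row_id_list : List Int) (row_id_list_prev : List Int) : List Int × List Int × List (List Int) :=
  let row_id_list_prev_set : PySem.Set Int := PySem.Set.ofList row_id_list_prev
  let row_id_list_set : PySem.Set Int := PySem.Set.ofList row_id_list
  let deleted_rows := PySem.List.sorted (PySem.Set.diff row_id_list_prev_set row_id_list_set) (fun x => x) false
  let new_rows := PySem.List.sorted (PySem.Set.diff row_id_list_set row_id_list_prev_set) (fun x => x) false
  let existing_rows := PySem.List.sorted (PySem.Set.inter row_id_list_set row_id_list_prev) (fun x => x) false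
  let updated_existing_row_index := existing_rows.map (fun i =>
    [(((PySem.List.index? row_id_list i).getD 0 : Nat) : Int),
     (((PySem.List.index? row_id_list_prev i).getD 0 : Nat) : Int)])
  (deleted_rows, new_rows, updated_existing_row_index)

-- ===== PORT B =====
-- first_cur / first_prev: one enumerate pass, setdefault keeps the first index of each id
def pvFirstIdx (xs : List Int) : PySem.Dict Int Int :=
  (PySem.List.enumerate xs).foldl (fun d p => d.setdefault p.2 p.1) PySem.Dict.empty

-- the two-pointer merge loop of Source B as the obvious structural recursion on (cur, prev);
-- first_cur[a] / first_prev[a] cannot miss (a is in both lists), so the .getD 0 is unreachable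
def pvMerge (fc fp : PySem.Dict Int Int) : List Int → List Int → List Int × List Int × List (List Int)
  | [], ys => (ys, [], [])
  | x :: xs, [] => ([], x :: xs, [])
  | x :: xs, y :: ys =>
    if x = y then
      let r := pvMerge fc fp xs ys
      (r.1, r.2.1, [(fc.get? x).getD 0, (fp.get? x).getD 0] :: r.2.2)
    else if x < y then
      let r := pvMerge fc fp xs (y :: ys)
      (r.1, x :: r.2.1, r.2.2)
    else
      let r := pvMerge fc fp (x :: xs) ys
      (y :: r.1, r.2.1, r.2.2)
termination_by xs ys => xs.length + ys.length

def get_new_deleted_updated_rows_alt (row_id_list : List Int) (row_id_list_prev : List Int) : List Int × List Int × List (List Int) :=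
  let cur := PySem.List.sorted (PySem.Set.ofList row_id_list) (fun x => x) false
  let prev := PySem.List.sorted (PySem.Set.ofList row_id_list_prev) (fun x => x) false
  let first_cur := pvFirstIdx row_id_list
  let first_prev := pvFirstIdx row_id_list_prev
  pvMerge first_cur first_prev cur prev

-- ===== PRECONDITION & SPEC =====
def Spec_get_new_deleted_updated_rows (row_id_list : List Int) (row_id_list_prev : List Int) (out : List Int × List Int × List (List Int)) : Prop := out = get_new_deleted_updated_rows_alt row_id_list row_id_list_prev
instance (row_id_list : List Int) (row_id_list_prev : List Int) (out : List Int × List Int × List (List Int)) : Decidable (Spec_get_new_deleted_updated_rows row_id_list row_id_list_prev out) := by unfold Spec_get_new_deleted_updated_rows; infer_instance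

-- ===== CLAIM (what is proved, stated in full; the proofs are below) =====
def Claim_equal_get_new_deleted_updated_rows : Prop := ∀ (row_id_list : List Int) (row_id_list_prev : List Int), Dom_get_new_deleted_updated_rows row_id_list row_id_list_prev → Spec_get_new_deleted_updated_rows row_id_list row_id_list_prev (get_new_deleted_updated_rows row_id_list row_id_list_prev)

-- ===== LEMMAS AND PROOFS =====

-- the setdefault fold records the FIRST index of each id (list.index semantics)
theorem pv_first_get (xs : List Int) (s : Int) (d : PySem.Dict Int Int) (rid : Int) :
    ((PySem.List.enumerate xs s).foldl (fun d p => d.setdefault p.2 p.1) d).get? rid =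
      if d.contains rid then d.get? rid
      else (PySem.List.index? xs rid).map (fun k => s + (k : Int)) := by
  induction xs generalizing s d with
  | nil =>
    simp only [PySem.List.enumerate_nil, List.foldl_nil]
    cases hc : d.contains rid with
    | true => simp
    | false =>
      have h0 : d.get? rid = none := by
        rw [PySem.Dict.contains_eq_isSome_get?] at hc
        exact Option.not_isSome_iff_eq_none.mp (by simp [hc])
      simp [h0, PySem.List.index?]
  | cons x xs ih =>
    rw [PySem.List.enumerate_cons, List.foldl_cons, ih]
    by_cases hrx : rid = x
    · subst hrx
      rw [PySem.List.index?_cons_self]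
      cases hc : d.contains rid with
      | true => rw [PySem.Dict.setdefault_of_contains d s hc]; simp [hc]
      | false =>
        rw [PySem.Dict.setdefault_of_not_contains d s hc]
        simp [PySem.Dict.contains_insert_self, PySem.Dict.get?_insert_self]
    · have hcs : ((d.setdefault x s).contains rid) = d.contains rid := by
        rw [PySem.Dict.contains_setdefault d x rid s]
        simp [hrx]
      have hgs : ((d.setdefault x s).get? rid) = d.get? rid :=
        PySem.Dict.get?_setdefault_of_ne d s hrx
      rw [PySem.List.index?_cons_of_ne xs (fun h => hrx (Eq.symm h)), hcs, hgs]
      cases hi : PySem.List.index? xs rid <;> cases hcr : d.contains rid <;>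
        simp <;> omega

theorem pvFirstIdx_get (xs : List Int) (rid : Int) :
    (pvFirstIdx xs).get? rid = (PySem.List.index? xs rid).map (fun k => (k : Int)) := by
  unfold pvFirstIdx
  rw [pv_first_get]
  simp [PySem.Dict.contains_empty]

-- what the merge computes on two strictly increasing lists
theorem pv_merge_spec (fc fp : PySem.Dict Int Int) (X Y : List Int)
    (hX : X.Pairwise (· < ·)) (hY : Y.Pairwise (· < ·)) :
    pvMerge fc fp X Y =
      (Y.filter (fun b => !decide (b ∈ X)),
       X.filter (fun a => !decide (a ∈ Y)),
       (X.filter (fun a => decide (a ∈ Y))).map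
         (fun a => [(fc.get? a).getD 0, (fp.get? a).getD 0])) := by
  induction X generalizing Y with
  | nil => simp [pvMerge]
  | cons x xs ihX =>
    obtain ⟨hx, hxs⟩ := List.pairwise_cons.mp hX
    induction Y with
    | nil => simp [pvMerge]
    | cons y ys ihY =>
      obtain ⟨hy, hys⟩ := List.pairwise_cons.mp hY
      by_cases hxy : x = y
      · subst hxy
        rw [pvMerge, if_pos rfl, ihX ys hxs hys]
        have hdel : (x :: ys).filter (fun b => !decide (b ∈ x :: xs))
            = ys.filter (fun b => !decide (b ∈ xs)) := by
          rw [List.filter_cons]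
          simp only [List.mem_cons, true_or, decide_true, Bool.not_true,
            Bool.false_eq_true, if_false]
          exact List.filter_congr (fun b hb => by
            have := hy b hb
            have : b ≠ x := by omega
            simp [this])
        have hnew : (x :: xs).filter (fun a => !decide (a ∈ x :: ys))
            = xs.filter (fun a => !decide (a ∈ ys)) := by
          rw [List.filter_cons]
          simp only [List.mem_cons, true_or, decide_true, Bool.not_true,
            Bool.false_eq_true, if_false]
          exact List.filter_congr (fun a ha => by
            have := hx a ha
            have : a ≠ x := by omega
            simp [this])
        have hupd : (x :: xs).filter (fun a => decide (a ∈ x :: ys))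
            = x :: xs.filter (fun a => decide (a ∈ ys)) := by
          rw [List.filter_cons]
          simp only [List.mem_cons, true_or, decide_true, if_true]
          congr 1
          exact List.filter_congr (fun a ha => by
            have := hx a ha
            have : a ≠ x := by omega
            simp [this])
        rw [hdel, hnew, hupd]
        simp
      · by_cases hlt : x < y
        · rw [pvMerge, if_neg hxy, if_pos hlt, ihX (y :: ys) hxs hY]
          have hdel : (y :: ys).filter (fun b => !decide (b ∈ x :: xs))
              = (y :: ys).filter (fun b => !decide (b ∈ xs)) :=
            List.filter_congr (fun b hb => by
              have hby : b = y ∨ y < b := by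
                rcases List.mem_cons.mp hb with h | h
                · exact Or.inl h
                · exact Or.inr (hy b h)
              have : b ≠ x := by omega
              simp [this])
          have hnew : (x :: xs).filter (fun a => !decide (a ∈ y :: ys))
              = x :: xs.filter (fun a => !decide (a ∈ y :: ys)) := by
            rw [List.filter_cons]
            have hxny : x ∉ y :: ys := by
              intro h
              rcases List.mem_cons.mp h with h | h
              · omega
              · have := hy x h; omega
            simp [hxny]
          have hupd : (x :: xs).filter (fun a => decide (a ∈ y :: ys))
              = xs.filter (fun a => decide (a ∈ y :: ys)) := by
            rw [List.filter_cons]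
            have hxny : x ∉ y :: ys := by
              intro h
              rcases List.mem_cons.mp h with h | h
              · omega
              · have := hy x h; omega
            simp [hxny]
          rw [hdel, hnew, hupd]
        · have hgt : y < x := by omega
          rw [pvMerge, if_neg hxy, if_neg hlt, ihY hys]
          have hdel : (y :: ys).filter (fun b => !decide (b ∈ x :: xs))
              = y :: ys.filter (fun b => !decide (b ∈ x :: xs)) := by
            rw [List.filter_cons]
            have hynx : y ∉ x :: xs := by
              intro h
              rcases List.mem_cons.mp h with h | h
              · omega
              · have := hx y h; omega
            simp [hynx]
          have hnew : (x :: xs).filter (fun a => !decide (a ∈ y :: ys))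
              = (x :: xs).filter (fun a => !decide (a ∈ ys)) :=
            List.filter_congr (fun a ha => by
              have hax : a = x ∨ x < a := by
                rcases List.mem_cons.mp ha with h | h
                · exact Or.inl h
                · exact Or.inr (hx a h)
              have : a ≠ y := by omega
              simp [this])
          have hupd : (x :: xs).filter (fun a => decide (a ∈ y :: ys))
              = (x :: xs).filter (fun a => decide (a ∈ ys)) :=
            List.filter_congr (fun a ha => by
              have hax : a = x ∨ x < a := by
                rcases List.mem_cons.mp ha with h | h
                · exact Or.inl h
                · exact Or.inr (hx a h)
              have : a ≠ y := by omega
              simp [this])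
          rw [hdel, hnew, hupd]

theorem pv_main (cur prev : List Int) :
    get_new_deleted_updated_rows cur prev = get_new_deleted_updated_rows_alt cur prev := by
  show (PySem.List.sorted (PySem.Set.diff (PySem.Set.ofList prev) (PySem.Set.ofList cur)) (fun x => x) false,
      PySem.List.sorted (PySem.Set.diff (PySem.Set.ofList cur) (PySem.Set.ofList prev)) (fun x => x) false,
      (PySem.List.sorted (PySem.Set.inter (PySem.Set.ofList cur) prev) (fun x => x) false).map
        (fun i => [(((PySem.List.index? cur i).getD 0 : Nat) : Int), (((PySem.List.index? prev i).getD 0 : Nat) : Int)]))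
    = pvMerge (pvFirstIdx cur) (pvFirstIdx prev)
        (PySem.List.sorted (PySem.Set.ofList cur) (fun x => x) false)
        (PySem.List.sorted (PySem.Set.ofList prev) (fun x => x) false)
  set X := PySem.List.sorted (PySem.Set.ofList cur) (fun x => x) false with hXdef
  set Y := PySem.List.sorted (PySem.Set.ofList prev) (fun x => x) false with hYdef
  have hXs : X.Pairwise (· < ·) := PySem.List.sorted_ofList_pairwise_lt cur
  have hYs : Y.Pairwise (· < ·) := PySem.List.sorted_ofList_pairwise_lt prev
  have hXnd : X.Nodup := hXs.imp (fun h => by omega)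
  have hYnd : Y.Nodup := hYs.imp (fun h => by omega)
  have hXm : ∀ a, a ∈ X ↔ a ∈ cur := fun a => by
    rw [hXdef, PySem.List.mem_sorted, PySem.Set.mem_ofList]
  have hYm : ∀ a, a ∈ Y ↔ a ∈ prev := fun a => by
    rw [hYdef, PySem.List.mem_sorted, PySem.Set.mem_ofList]
  rw [pv_merge_spec _ _ X Y hXs hYs]
  have hDel : PySem.List.sorted (PySem.Set.diff (PySem.Set.ofList prev) (PySem.Set.ofList cur)) (fun x => x) false
      = Y.filter (fun b => !decide (b ∈ X)) := by
    apply PySem.List.sorted_eq_of_perm_of_pairwise_lt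
    · refine (List.perm_ext_iff_of_nodup (List.Nodup.filter _ hYnd)
        (PySem.Set.nodup_diff _ _ (PySem.Set.nodup_ofList prev))).mpr ?_
      intro a
      rw [List.mem_filter, PySem.Set.mem_diff, PySem.Set.mem_ofList, PySem.Set.mem_ofList, hYm a]
      simp [hXm a]
    · exact hYs.filter _
  have hNew : PySem.List.sorted (PySem.Set.diff (PySem.Set.ofList cur) (PySem.Set.ofList prev)) (fun x => x) false
      = X.filter (fun a => !decide (a ∈ Y)) := by
    apply PySem.List.sorted_eq_of_perm_of_pairwise_lt
    · refine (List.perm_ext_iff_of_nodup (List.Nodup.filter _ hXnd)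
        (PySem.Set.nodup_diff _ _ (PySem.Set.nodup_ofList cur))).mpr ?_
      intro a
      rw [List.mem_filter, PySem.Set.mem_diff, PySem.Set.mem_ofList, PySem.Set.mem_ofList, hXm a]
      simp [hYm a]
    · exact hXs.filter _
  have hEx : PySem.List.sorted (PySem.Set.inter (PySem.Set.ofList cur) prev) (fun x => x) false
      = X.filter (fun a => decide (a ∈ Y)) := by
    apply PySem.List.sorted_eq_of_perm_of_pairwise_lt
    · refine (List.perm_ext_iff_of_nodup (List.Nodup.filter _ hXnd)
        (PySem.Set.nodup_inter _ _ (PySem.Set.nodup_ofList cur))).mpr ?_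
      intro a
      rw [List.mem_filter, PySem.Set.mem_inter, PySem.Set.mem_ofList, hXm a]
      simp [hYm a]
    · exact hXs.filter _
  rw [hDel, hNew, hEx]
  refine Prod.ext rfl (Prod.ext rfl ?_)
  apply List.map_congr_left
  intro a ha
  have ham := List.mem_filter.mp ha
  have hac : a ∈ cur := (hXm a).mp ham.1
  have hap : a ∈ prev := (hYm a).mp (of_decide_eq_true ham.2)
  rw [pvFirstIdx_get, pvFirstIdx_get]
  obtain ⟨i, hi⟩ := Option.isSome_iff_exists.mp ((PySem.List.index?_isSome_iff cur a).mpr hac)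
  obtain ⟨j, hj⟩ := Option.isSome_iff_exists.mp ((PySem.List.index?_isSome_iff prev a).mpr hap)
  rw [hi, hj]
  simp

-- ===== VERDICT (by name: the statement is the Claim_ definition above) =====
theorem get_new_deleted_updated_rows_spec : Claim_equal_get_new_deleted_updated_rows := by
  intro row_id_list row_id_list_prev _
  unfold Spec_get_new_deleted_updated_rows
  exact pv_main row_id_list row_id_list_prev
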